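-- pv_equiv track=rewrite | github.com/mooka007/week1 | D2/challenge.py | create_letter_index_dict
-- ===== SOURCE A (Python) =====
-- def create_letter_index_dict(word):
--     letter_dict = {}
--     for index, letter in enumerate(word):
--         if letter in letter_dict:
--             letter_dict[letter].append(index)
--         else:
--             letter_dict[letter] = [index]
--     return letter_dict
-- ===== SOURCE B (Python) =====
-- def create_letter_index_dict(word):
--     # group-then-scan: distinct letters in first-occurrence order, one index scan per letter
--     return {c: [i for i, l in enumerate(word) if l == c] for c in dict.fromkeys(word)}
-- ===== Notes on version B (the rewrite author's own statement) =====
-- stated objective: idiomatic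
-- what changed: Replaces the single accumulating append/insert pass with a dict comprehension: distinct letters via dict.fromkeys (first-occurrence order), each mapped to the indices found by a per-letter scan of enumerate(word).
import Mathlib
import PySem

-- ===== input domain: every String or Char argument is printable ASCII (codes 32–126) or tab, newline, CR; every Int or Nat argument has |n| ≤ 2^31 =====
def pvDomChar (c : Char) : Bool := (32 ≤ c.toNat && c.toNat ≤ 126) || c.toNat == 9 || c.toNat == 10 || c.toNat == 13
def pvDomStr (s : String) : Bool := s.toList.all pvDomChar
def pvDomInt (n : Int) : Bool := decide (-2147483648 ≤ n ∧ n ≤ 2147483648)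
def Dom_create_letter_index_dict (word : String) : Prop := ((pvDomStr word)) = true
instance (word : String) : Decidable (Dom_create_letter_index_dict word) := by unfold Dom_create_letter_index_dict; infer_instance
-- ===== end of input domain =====

-- B replaces the accumulating append/insert pass with a group-then-scan dict comprehension (idiomatic; same observable dict).


-- ===== PORT A =====
def create_letter_index_dict (word : String) : List (String × List Int) :=
  ((PySem.List.enumerate (word.toList.map (fun c => String.ofList [c]))).foldl
    (fun (d : PySem.Dict String (List Int)) (p : Int × String) =>
      if d.contains p.2 then d.modify p.2 [] (fun v => v ++ [p.1])
      else d.insert p.2 [p.1])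
    PySem.Dict.empty).items

-- ===== PORT B =====
def create_letter_index_dict_alt (word : String) : List (String × List Int) :=
  let chars := word.toList.map (fun c => String.ofList [c])
  (PySem.Set.ofList chars).map
    (fun c => (c, ((PySem.List.enumerate chars).filter (fun p => p.2 == c)).map (fun p => p.1)))

-- ===== PRECONDITION & SPEC =====
def Spec_create_letter_index_dict (word : String) (out : List (String × List Int)) : Prop := out = create_letter_index_dict_alt word
instance (word : String) (out : List (String × List Int)) : Decidable (Spec_create_letter_index_dict word out) := by unfold Spec_create_letter_index_dict; infer_instance

-- ===== CLAIM (what is proved, stated in full; the proofs are below) =====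
def Claim_equal_create_letter_index_dict : Prop := ∀ (word : String), Dom_create_letter_index_dict word → Spec_create_letter_index_dict word (create_letter_index_dict word)

-- ===== LEMMAS AND PROOFS =====

-- A's loop body is exactly 'modify p.2 [] (· ++ [p.1])' on every input dict.
theorem pv_step_eq (d : PySem.Dict String (List Int)) (p : Int × String) :
    (if d.contains p.2 then d.modify p.2 [] (fun v => v ++ [p.1])
     else d.insert p.2 [p.1])
    = d.modify p.2 [] (fun v => v ++ [p.1]) := by
  by_cases h : d.contains p.2
  · simp [h]
  · simp only [Bool.not_eq_true] at h
    simp [h, PySem.Dict.modify, PySem.Dict.getD_of_not_contains (h := h)]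

theorem create_letter_index_dict_spec_aux (word : String) :
    create_letter_index_dict word = create_letter_index_dict_alt word := by
  unfold create_letter_index_dict create_letter_index_dict_alt
  set chars := word.toList.map (fun c => String.ofList [c]) with hchars
  set l := PySem.List.enumerate chars with hl
  have hstep : (l.foldl
      (fun (d : PySem.Dict String (List Int)) (p : Int × String) =>
        if d.contains p.2 then d.modify p.2 [] (fun v => v ++ [p.1])
        else d.insert p.2 [p.1]) PySem.Dict.empty)
      = l.foldl (fun d p => d.modify p.2 [] (fun v => v ++ [p.1])) PySem.Dict.empty := by
    apply PySem.List.foldl_congr_mem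
    intro d p _
    exact pv_step_eq d p
  rw [hstep]
  -- swap pairs so that the key sits first, to reuse the grouped-append lemmas
  have hswap : l.foldl
      (fun (d : PySem.Dict String (List Int)) (p : Int × String) => d.modify p.2 [] (fun v => v ++ [p.1]))
      PySem.Dict.empty
      = (l.map Prod.swap).foldl
          (fun (d : PySem.Dict String (List Int)) (p : String × Int) => d.modify p.1 [] (fun v => v ++ [p.2]))
          PySem.Dict.empty := by
    rw [List.foldl_map]; simp [Prod.swap]
  rw [hswap]
  set D := (l.map Prod.swap).foldl
      (fun (d : PySem.Dict String (List Int)) (p : String × Int) => d.modify p.1 [] (fun v => v ++ [p.2]))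
      PySem.Dict.empty with hD
  have hnodup : D.keys.Nodup := by
    rw [hD]
    exact PySem.Dict.nodup_keys_foldl_modify_key (l.map Prod.swap) Prod.fst [] _ _
      PySem.Dict.nodup_keys_empty
  have hkeys : D.keys = PySem.Set.ofList chars := by
    rw [hD, PySem.Dict.keys_foldl_modify_key]
    have : (l.map Prod.swap).map Prod.fst = chars := by
      simp only [List.map_map]
      have : (Prod.fst ∘ Prod.swap : Int × String → String) = Prod.snd := rfl
      rw [this, hl, PySem.List.map_snd_enumerate]
    rw [this]
    simp [PySem.Dict.keys_empty, PySem.Set.update_nil_left]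
  have hget : ∀ c : String, D.getD c [] = ((l.filter (fun p => p.2 == c)).map (fun p => p.1)) := by
    intro c
    rw [hD, PySem.Dict.getD_foldl_modify_append]
    have hf : (l.map Prod.swap).filter (fun p => p.1 == c) = (l.filter (fun p => p.2 == c)).map Prod.swap := by
      rw [List.filter_map]
      rfl
    rw [hf]
    simp [PySem.Dict.getD_empty, List.map_map]
  have hitems := PySem.Dict.items_eq_map_keys D hnodup []
  rw [hitems, hkeys]
  apply List.map_congr_left
  intro c _
  rw [hget c]

-- ===== VERDICT (by name: the statement is the Claim_ definition above) =====
theorem create_letter_index_dict_spec : Claim_equal_create_letter_index_dict := by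
  intro word _
  exact create_letter_index_dict_spec_aux word
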